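-- pv_equiv track=rewrite | github.com/daniel-reich/ubiquitous-fiesta | xYRNzJB7kAXXEQSdF_22.py | wiggle_string
-- ===== SOURCE A (Python) =====
-- def wiggle_string(s): #w/o built-in
--   def l(st):
--     count = 0
--     while st != "":
--       count += 1
--       st = st[1:]
--     return count
--   w, c = [s], s[::-1]
--   while l(w[-1]) < 2* l(s):
--     c += " "
--     w += [c]
--   w_s = [s] + [x[::-1] for x in w][1:]
--   return w_s + w_s[::-1][1:]
-- ===== SOURCE B (Python) =====
-- def wiggle_string(s):
--     n = len(s)
--     return [' ' * (n - abs(n - i)) + s for i in range(2 * n + 1)]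
-- ===== Notes on version B (the rewrite author's own statement) =====
-- stated objective: faster
-- what changed: Replaces the reversed-string accumulation loop, the hand-rolled length counter that recomputes length by repeated slicing, and the mirror-by-reversed-slice with a single closed-form comprehension over range(2n+1) computing each pad width as n - abs(n - i).
import Mathlib
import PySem

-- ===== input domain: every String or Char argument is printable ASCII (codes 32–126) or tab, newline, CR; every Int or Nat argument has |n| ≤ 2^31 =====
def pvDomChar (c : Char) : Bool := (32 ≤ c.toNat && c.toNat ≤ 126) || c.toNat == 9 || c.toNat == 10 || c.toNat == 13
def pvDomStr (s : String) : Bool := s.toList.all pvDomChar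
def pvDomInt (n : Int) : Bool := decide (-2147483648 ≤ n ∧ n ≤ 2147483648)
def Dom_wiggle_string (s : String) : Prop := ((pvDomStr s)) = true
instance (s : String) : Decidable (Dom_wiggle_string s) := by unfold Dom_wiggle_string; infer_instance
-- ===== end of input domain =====

-- B replaces A's reversed-string accumulation loop and mirror-by-reversed-slice with one
-- closed-form comprehension over range(2n+1); objective: faster (A recounts length by repeated slicing).

-- ===== PORT A =====
-- inner helper l(st): counts characters by repeatedly taking st[1:]
def pvL (st : List Char) (count : Int) : Int :=
  if h : st = [] then count
  else pvL (PySem.List.slice st (some 1) none) (count + 1)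
termination_by st.length
decreasing_by
  rw [PySem.List.slice_from_one]
  cases st with
  | nil => exact absurd rfl h
  | cons a t => simp

-- the 'while l(w[-1]) < 2*l(s)' loop; fuel only makes the recursion total (it is never exhausted)
def pvWigLoop (target : Int) (w : List (List Char)) (c : List Char) : Nat → List (List Char)
  | 0 => w
  | fuel + 1 =>
    if pvL (PySem.List.pyGetD w (-1) []) 0 < target then
      pvWigLoop target (w ++ [c ++ [' ']]) (c ++ [' ']) fuel
    else w

def wiggle_string (s : String) : List String :=
  let cs := s.toList
  let c0 := (PySem.List.slice? cs none none (-1)).getD []          -- s[::-1]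
  let w := pvWigLoop (2 * pvL cs 0) [cs] c0 (2 * cs.length + 2)
  let w_s := [cs] ++ PySem.List.slice
      (w.map (fun x => (PySem.List.slice? x none none (-1)).getD [])) (some 1) none
  let res := w_s ++ PySem.List.slice
      ((PySem.List.slice? w_s none none (-1)).getD []) (some 1) none
  res.map String.ofList

-- ===== PORT B =====
def wiggle_string_alt (s : String) : List String :=
  let cs := s.toList
  let n : Int := PySem.List.len cs
  (PySem.List.pyRange 0 (2 * n + 1) 1).map
    (fun i => String.ofList (List.replicate (n - ((n - i).natAbs : Int)).toNat ' ' ++ cs))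

-- ===== PRECONDITION & SPEC =====
def Spec_wiggle_string (s : String) (out : List String) : Prop := out = wiggle_string_alt s
instance (s : String) (out : List String) : Decidable (Spec_wiggle_string s out) := by unfold Spec_wiggle_string; infer_instance

-- ===== CLAIM (what is proved, stated in full; the proofs are below) =====
def Claim_equal_wiggle_string : Prop := ∀ (s : String), Dom_wiggle_string s → Spec_wiggle_string s (wiggle_string s)

-- ===== LEMMAS AND PROOFS =====

theorem pvL_eq (cs : List Char) (k : Int) : pvL cs k = k + cs.length := by
  induction cs generalizing k with
  | nil => rw [pvL]; simp
  | cons a t ih =>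
    rw [pvL]
    simp [PySem.List.slice_from_one, ih]
    omega

theorem pv_last_concat (pre : List (List Char)) (x : List Char) :
    PySem.List.pyGetD (pre ++ [x]) (-1) [] = x := by
  rw [PySem.List.pyGetD_neg_ofNat (pre ++ [x]) 1 [] (by omega) (by simp)]
  simp

theorem pv_rep_succ (i : Nat) : List.replicate i ' ' ++ [' '] = List.replicate (1+i) ' ' := by
  rw [Nat.add_comm]; simp [List.replicate_succ']

theorem pvWigLoop_inv (cs : List Char) (i fuel : Nat)
    (hin : i ≤ cs.length) (hfuel : cs.length - i ≤ fuel) :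
    pvWigLoop (2 * (cs.length : Int))
      ([cs] ++ (List.range' 1 i).map (fun k => cs.reverse ++ List.replicate k ' '))
      (cs.reverse ++ List.replicate i ' ') fuel
    = [cs] ++ (List.range' 1 cs.length).map (fun k => cs.reverse ++ List.replicate k ' ') := by
  induction fuel generalizing i with
  | zero =>
    have : i = cs.length := by omega
    subst this; rfl
  | succ f ih =>
    have hlen : pvL (PySem.List.pyGetD
        ([cs] ++ (List.range' 1 i).map (fun k => cs.reverse ++ List.replicate k ' ')) (-1) []) 0
        = (cs.length : Int) + i := by
      cases i with
      | zero =>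
        have := pv_last_concat [] cs
        simp at this
        simp [this, pvL_eq]
      | succ j =>
        rw [show ([cs] ++ (List.range' 1 (j+1)).map (fun k => cs.reverse ++ List.replicate k ' '))
            = ([cs] ++ (List.range' 1 j).map (fun k => cs.reverse ++ List.replicate k ' '))
              ++ [cs.reverse ++ List.replicate (j+1) ' '] by
          rw [List.range'_concat]; simp [Nat.add_comm]]
        rw [pv_last_concat]
        simp [pvL_eq]
    rw [pvWigLoop]
    by_cases hcond : i < cs.length
    · rw [if_pos (by rw [hlen]; omega)]
      have h1 : ((List.range' 1 i).map (fun k => cs.reverse ++ List.replicate k ' '))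
          ++ [cs.reverse ++ List.replicate i ' ' ++ [' ']]
          = (List.range' 1 (i+1)).map (fun k => cs.reverse ++ List.replicate k ' ') := by
        rw [List.range'_concat]
        simp [pv_rep_succ]
      have h2 : cs.reverse ++ List.replicate i ' ' ++ [' ']
          = cs.reverse ++ List.replicate (i+1) ' ' := by
        rw [List.append_assoc, pv_rep_succ, Nat.add_comm]
      rw [List.append_assoc, h1, h2]
      exact ih (i+1) (by omega) (by omega)
    · have : i = cs.length := by omega
      rw [if_neg (by rw [hlen]; omega)]
      subst this; rfl

theorem pv_main_lists (cs : List Char) :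
    (List.range (cs.length+1)).map (fun k => List.replicate k ' ' ++ cs)
      ++ ((List.range cs.length).map (fun k => List.replicate k ' ' ++ cs)).reverse
    = (List.range (2*cs.length+1)).map
        ((fun i : Int => List.replicate (((cs.length:Int) - ((((cs.length:Int) - i).natAbs : Int))).toNat) ' ' ++ cs)
          ∘ (fun k : Nat => 0 + (k : Int))) := by
  apply List.ext_getElem
  · simp; omega
  · intro i h1 h2
    rw [List.getElem_map, List.getElem_range]
    simp only [Function.comp_apply]
    by_cases hi : i < cs.length + 1
    · rw [List.getElem_append_left (by simpa using hi)]
      rw [List.getElem_map, List.getElem_range]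
      have hx : (((cs.length:Int) - ((((cs.length:Int) - (0 + (i:Int))).natAbs : Int))).toNat) = i := by omega
      rw [hx]
    · rw [List.getElem_append_right (by simp; omega)]
      rw [List.getElem_reverse]
      simp only [List.length_map, List.length_range]
      rw [List.getElem_map, List.getElem_range]
      have hx : (((cs.length:Int) - ((((cs.length:Int) - (0 + (i:Int))).natAbs : Int))).toNat)
          = cs.length - 1 - (i - (cs.length + 1)) := by
        omega
      rw [hx]

theorem wiggle_string_chars (cs : List Char) :
    ([cs] ++ PySem.List.slice
        (((pvWigLoop (2 * pvL cs 0) [cs]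
            ((PySem.List.slice? cs none none (-1)).getD []) (2 * cs.length + 2)).map
          (fun x => (PySem.List.slice? x none none (-1)).getD []))) (some 1) none)
      ++ PySem.List.slice
        ((PySem.List.slice? ([cs] ++ PySem.List.slice
            (((pvWigLoop (2 * pvL cs 0) [cs]
                ((PySem.List.slice? cs none none (-1)).getD []) (2 * cs.length + 2)).map
              (fun x => (PySem.List.slice? x none none (-1)).getD []))) (some 1) none)
          none none (-1)).getD []) (some 1) none
    = (PySem.List.pyRange 0 (2 * (PySem.List.len cs) + 1) 1).map
        (fun i => List.replicate (((PySem.List.len cs) - (((PySem.List.len cs) - i).natAbs : Int)).toNat) ' ' ++ cs) := by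
  have hW := pvWigLoop_inv cs 0 (2 * cs.length + 2) (by omega) (by omega)
  simp only [List.range'_zero, List.map_nil, List.append_nil, List.replicate_zero] at hW
  rw [PySem.List.slice?_none_none_neg_one, Option.getD_some, pvL_eq]
  rw [show (2 * (0 + (cs.length : Int))) = 2 * (cs.length : Int) by ring]
  rw [hW]
  -- reverse each element of w, drop the first
  have hmap : (([cs] ++ (List.range' 1 cs.length).map
        (fun k => cs.reverse ++ List.replicate k ' ')).map
          (fun x => (PySem.List.slice? x none none (-1)).getD []))
      = [cs.reverse] ++ (List.range' 1 cs.length).map (fun k => List.replicate k ' ' ++ cs) := by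
    simp [PySem.List.slice?_none_none_neg_one, List.map_map, Function.comp_def,
      List.reverse_append]
  rw [hmap, PySem.List.slice_from_one]
  have hws : [cs] ++ ([cs.reverse] ++ (List.range' 1 cs.length).map
        (fun k => List.replicate k ' ' ++ cs)).tail
      = (List.range (cs.length+1)).map (fun k => List.replicate k ' ' ++ cs) := by
    rw [List.range_eq_range', List.range'_succ]
    simp
  rw [hws]
  rw [PySem.List.slice?_none_none_neg_one, Option.getD_some, PySem.List.slice_from_one]
  -- tail of the reverse = reverse of dropLast
  have htl : ((List.range (cs.length+1)).map (fun k => List.replicate k ' ' ++ cs)).reverse.tail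
      = ((List.range cs.length).map (fun k => List.replicate k ' ' ++ cs)).reverse := by
    rw [List.range_succ, List.map_append, List.reverse_append]
    simp
  rw [htl]
  rw [PySem.List.pyRange_one]
  simp only [PySem.List.len_eq, sub_zero]
  have h2n : ((2 * (cs.length : Int) + 1)).toNat = 2 * cs.length + 1 := by omega
  rw [h2n, List.map_map]
  exact pv_main_lists cs

theorem wiggle_string_spec : Claim_equal_wiggle_string := by
  intro s _
  unfold Spec_wiggle_string
  rw [wiggle_string, wiggle_string_alt]
  have h := congrArg (List.map String.ofList) (wiggle_string_chars s.toList)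
  rw [List.map_map] at h
  simp only [Function.comp_def] at h
  exact h
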